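-- pv_equiv track=rewrite | github.com/18dhruvm/CSCI-561-Artificial-Intelligence | Homework 2/my_player.py | all_Liberties
-- ===== SOURCE A (Python) =====
-- import copy
--
-- BOARD_SIZE = 5
--
-- def neighbours(row,col):
--
--   return [(r, c) for r, c in [(row - 1, col), (row + 1, col), (row, col - 1), (row, col + 1)]
--           if 0 <= r < BOARD_SIZE and 0 <= c < BOARD_SIZE]
--
-- def detect_neighbor_ally(board,row,col):
--
--   neighbors = neighbours(row,col)  # Detect neighbors
--   group_allies = []
--   for piece in neighbors:
--     # Add to allies list if having the same color
--     if board[piece[0]][piece[1]] == board[row][col]: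
--         group_allies.append(piece)
--   return group_allies
--
-- def ally_dfs(current_state,i,j):
--   stack = [(i, j)]  # stack for DFS serach
--   ally_members = []  # record allies positions during the search
--   while stack:
--       piece = stack.pop()
--       ally_members.append(piece)
--       neighbor_allies = detect_neighbor_ally(current_state,piece[0], piece[1])
--       for ally in neighbor_allies:
--           if ally not in stack and ally not in ally_members:
--               stack.append(ally)
--   return ally_members
--
-- def check_Libs(current_state, row, col, stone_type):
--   ally_members = ally_dfs(current_state,row,col)
--   for member in ally_members:
--     neighbors = neighbours(member[0], member[1])
--     for piece in neighbors:
--         # If there is empty space around a piece, it has liberty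
--         if current_state[piece[0]][piece[1]] == 0:
--             return True
--   # If none of the pieces in a allied group has an empty space, it has no liberty
--   return False
--
-- def empty_Spaces(current_state):
--   empty_spaces = []
--   for i in range(BOARD_SIZE):
--     for j in range(BOARD_SIZE):
--       if current_state[i][j] == 0:
--         empty_spaces.append((i,j))
--
--   return empty_spaces
--
-- def all_Liberties(current_state, stone_colour):
--   l=[]
--
--   for i,j in empty_Spaces(current_state):
--     copy4=copy.deepcopy(current_state)
--     copy4[i][j] = stone_colour
--     if check_Libs(copy4,i,j,stone_colour):
--       l.append((i,j))
--
--   return l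
-- ===== SOURCE B (Python) =====
-- BOARD_SIZE = 5
--
-- def _nbrs(row, col):
--     return [(r, c) for r, c in ((row - 1, col), (row + 1, col), (row, col - 1), (row, col + 1))
--             if 0 <= r < BOARD_SIZE and 0 <= c < BOARD_SIZE]
--
-- def all_Liberties(current_state, stone_colour):
--     # One sweep: connected components of stone_colour stones with their liberty sets,
--     # then a constant-work test per empty cell (no deepcopy, no per-cell DFS).
--     comps = []  # list of (component set, liberty set)
--     for i in range(BOARD_SIZE):
--         for j in range(BOARD_SIZE):
--             if current_state[i][j] == stone_colour and not any((i, j) in c for c, _ in comps):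
--                 comp = {(i, j)}
--                 frontier = [(i, j)]
--                 while frontier:
--                     p = frontier.pop()
--                     for q in _nbrs(p[0], p[1]):
--                         if current_state[q[0]][q[1]] == stone_colour and q not in comp:
--                             comp.add(q)
--                             frontier.append(q)
--                 libs = {r for q in comp for r in _nbrs(q[0], q[1]) if current_state[r[0]][r[1]] == 0}
--                 comps.append((comp, libs))
--     out = []
--     for i in range(BOARD_SIZE):
--         for j in range(BOARD_SIZE):
--             if current_state[i][j] == 0:
--                 libs = set()
--                 for p in _nbrs(i, j):
--                     if current_state[p[0]][p[1]] == 0: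
--                         libs.add(p)
--                     if current_state[p[0]][p[1]] == stone_colour:
--                         for comp, clibs in comps:
--                             if p in comp:
--                                 libs |= clibs
--                                 break
--                 libs.discard((i, j))
--                 if libs:
--                     out.append((i, j))
--     return out
-- ===== Notes on version B (the rewrite author's own statement) =====
-- stated objective: alternative
-- what changed: B computes the connected components of stone_colour stones and their liberty sets once in a single sweep, then decides each empty cell by unioning the liberty sets of adjacent components (plus empty neighbours) and removing the cell itself, instead of A's deepcopy of the whole board plus a fresh DFS from scratch for every empty cell.
import Mathlib
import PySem

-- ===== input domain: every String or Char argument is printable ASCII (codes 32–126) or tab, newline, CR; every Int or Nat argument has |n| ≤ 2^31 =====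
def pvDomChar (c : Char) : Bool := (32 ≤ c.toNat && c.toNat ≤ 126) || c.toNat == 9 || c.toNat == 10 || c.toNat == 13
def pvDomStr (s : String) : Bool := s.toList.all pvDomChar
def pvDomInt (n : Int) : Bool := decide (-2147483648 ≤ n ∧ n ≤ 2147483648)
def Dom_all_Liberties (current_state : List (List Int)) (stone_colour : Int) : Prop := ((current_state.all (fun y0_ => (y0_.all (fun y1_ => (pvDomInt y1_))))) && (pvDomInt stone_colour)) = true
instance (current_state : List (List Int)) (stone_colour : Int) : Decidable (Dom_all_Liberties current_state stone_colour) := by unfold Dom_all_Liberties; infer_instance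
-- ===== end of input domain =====

-- B replaces A's per-empty-cell board deepcopy + fresh DFS by ONE component sweep (components of
-- stone_colour stones with their liberty sets) and a neighbourhood lookup per empty cell.
-- Equivalence of the RETURN value is proved; neither program mutates its arguments.

-- ===== PORT A =====
-- board[r][c]; indices are in range wherever A reads them under Pre_ (the default is never reached there)
def cellA (b : List (List Int)) (r c : Int) : Int :=
  PySem.List.pyGetD (PySem.List.pyGetD b r []) c 0

-- neighbours(row, col)  (BOARD_SIZE = 5)
def pyNeighbours (row col : Int) : List (Int × Int) :=
  ([(row - 1, col), (row + 1, col), (row, col - 1), (row, col + 1)] : List (Int × Int)).filter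
    (fun rc => decide (0 ≤ rc.1 ∧ rc.1 < 5 ∧ 0 ≤ rc.2 ∧ rc.2 < 5))

-- detect_neighbor_ally
def pyDetectAlly (b : List (List Int)) (row col : Int) : List (Int × Int) :=
  (pyNeighbours row col).foldl
    (fun acc p => if cellA b p.1 p.2 == cellA b row col then acc ++ [p] else acc) []

-- the while-loop of ally_dfs; Python pops and pushes at the list's END, modelled here with the head
-- as the stack top (same pop order, same membership tests).  The fuel only makes the recursion
-- structural: 26 always suffices on the 5×5 board (each iteration appends a fresh cell to
-- ally_members; see pyDfsLoop_complete below).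
def pyDfsLoop (b : List (List Int)) : Nat → List (Int × Int) → List (Int × Int) → List (Int × Int)
  | 0, _, ms => ms
  | _ + 1, [], ms => ms
  | fuel + 1, p :: rest, ms =>
    let ms' := ms ++ [p]
    let st' := (pyDetectAlly b p.1 p.2).foldl
      (fun st q => if !st.contains q && !ms'.contains q then q :: st else st) rest
    pyDfsLoop b fuel st' ms'

def pyAllyDfs (b : List (List Int)) (i j : Int) : List (Int × Int) :=
  pyDfsLoop b 26 [(i, j)] []

-- check_Libs (the two for-loops with the early 'return True' are the nested any)
def pyCheckLibs (b : List (List Int)) (row col stone_type : Int) : Bool :=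
  (pyAllyDfs b row col).any
    (fun m => (pyNeighbours m.1 m.2).any (fun p => cellA b p.1 p.2 == 0))

def pyEmptySpaces (b : List (List Int)) : List (Int × Int) :=
  (PySem.List.pyRange 0 5 1).foldl (fun acc i =>
    (PySem.List.pyRange 0 5 1).foldl (fun acc j =>
      if cellA b i j == 0 then acc ++ [(i, j)] else acc) acc) []

-- copy.deepcopy followed by copy4[i][j] = v (the indices come from empty_Spaces, hence 0 ≤ i,j < 5)
def setCellA (b : List (List Int)) (i j v : Int) : List (List Int) :=
  PySem.List.pySetD b i (PySem.List.pySetD (PySem.List.pyGetD b i []) j v)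

def all_Liberties (current_state : List (List Int)) (stone_colour : Int) : List (Int × Int) :=
  (pyEmptySpaces current_state).foldl
    (fun l p =>
      if pyCheckLibs (setCellA current_state p.1 p.2 stone_colour) p.1 p.2 stone_colour
      then l ++ [p] else l) []

-- ===== PORT B =====
-- Source B's _nbrs and its board indexing are literally the same code as A's neighbours and
-- board[r][c]; they are ported by the same two definitions (pyNeighbours, cellA), not duplicated.

-- the component flood fill (while frontier: …); the frontier's head is Python's list end.
-- Fuel 27 always suffices (every push marks a fresh cell of the 5×5 board; see floodLoopB_complete).
def floodLoopB (b : List (List Int)) (sc : Int) :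
    Nat → List (Int × Int) → PySem.Set (Int × Int) → PySem.Set (Int × Int)
  | 0, _, comp => comp
  | _ + 1, [], comp => comp
  | fuel + 1, p :: rest, comp =>
    let s := (pyNeighbours p.1 p.2).foldl
      (fun (s : List (Int × Int) × PySem.Set (Int × Int)) q =>
        if cellA b q.1 q.2 == sc && !(PySem.Set.contains s.2 q)
        then (q :: s.1, PySem.Set.add s.2 q) else s) (rest, comp)
    floodLoopB b sc fuel s.1 s.2

-- {r for q in comp for r in _nbrs(*q) if board r == 0}
def libsOfB (b : List (List Int)) (comp : PySem.Set (Int × Int)) : PySem.Set (Int × Int) :=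
  comp.foldl (fun s q =>
    (pyNeighbours q.1 q.2).foldl
      (fun s r => if cellA b r.1 r.2 == 0 then PySem.Set.add s r else s) s) PySem.Set.empty

-- the first sweep building the (component, liberty-set) pairs
def compsB (b : List (List Int)) (sc : Int) :
    List (PySem.Set (Int × Int) × PySem.Set (Int × Int)) :=
  (PySem.List.pyRange 0 5 1).foldl (fun comps i =>
    (PySem.List.pyRange 0 5 1).foldl (fun comps j =>
      if cellA b i j == sc && !(comps.any (fun c => PySem.Set.contains c.1 (i, j))) then
        let comp := floodLoopB b sc 27 [(i, j)] (PySem.Set.ofList [(i, j)])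
        comps ++ [(comp, libsOfB b comp)]
      else comps) comps) []

-- the per-empty-cell liberty set (loop body incl. libs.discard((i,j)));
-- 'for comp, clibs in comps: if p in comp: libs |= clibs; break' is the find?
def cellLibsB (b : List (List Int)) (sc : Int)
    (comps : List (PySem.Set (Int × Int) × PySem.Set (Int × Int))) (i j : Int) :
    PySem.Set (Int × Int) :=
  PySem.Set.discard
    ((pyNeighbours i j).foldl (fun s p =>
      let s := if cellA b p.1 p.2 == 0 then PySem.Set.add s p else s
      if cellA b p.1 p.2 == sc then
        match comps.find? (fun c => PySem.Set.contains c.1 p) with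
        | some c => PySem.Set.union s c.2
        | none => s
      else s) PySem.Set.empty)
    (i, j)

def all_Liberties_alt (current_state : List (List Int)) (stone_colour : Int) : List (Int × Int) :=
  let comps := compsB current_state stone_colour
  (PySem.List.pyRange 0 5 1).foldl (fun out i =>
    (PySem.List.pyRange 0 5 1).foldl (fun out j =>
      if cellA current_state i j == 0 then
        if (cellLibsB current_state stone_colour comps i j).isEmpty then out
        else out ++ [(i, j)]
      else out) out) []

-- ===== PRECONDITION & SPEC =====
-- A reads current_state[i][j] for all 0 ≤ i,j < 5 (BOARD_SIZE = 5) and raises IndexError on a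
-- smaller board; Pre_ admits exactly the boards on which A returns (rows past the fifth are unread).
def Pre_all_Liberties (current_state : List (List Int)) (stone_colour : Int) : Prop :=
  5 ≤ current_state.length ∧ ∀ row ∈ current_state.take 5, 5 ≤ row.length
instance (current_state : List (List Int)) (stone_colour : Int) : Decidable (Pre_all_Liberties current_state stone_colour) := by unfold Pre_all_Liberties; infer_instance

def pvWitness_all_Liberties : List (List Int) × Int :=
  ([[0, 1, 0, 0, 0], [1, 2, 0, 0, 0], [0, 0, 0, 1, 1], [2, 2, 0, 1, 0], [0, 2, 0, 0, 0]], 2)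

def Spec_all_Liberties (current_state : List (List Int)) (stone_colour : Int) (out : List (Int × Int)) : Prop := out = all_Liberties_alt current_state stone_colour
instance (current_state : List (List Int)) (stone_colour : Int) (out : List (Int × Int)) : Decidable (Spec_all_Liberties current_state stone_colour out) := by unfold Spec_all_Liberties; infer_instance

-- ===== CLAIM (what is proved, stated in full; the proofs are below) =====
def Claim_equal_all_Liberties : Prop := ∀ (current_state : List (List Int)) (stone_colour : Int), Dom_all_Liberties current_state stone_colour → Pre_all_Liberties current_state stone_colour → Spec_all_Liberties current_state stone_colour (all_Liberties current_state stone_colour)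

-- ===== LEMMAS AND PROOFS =====

-- in-bounds cells of the 5×5 board
def inb (p : Int × Int) : Prop := 0 ≤ p.1 ∧ p.1 < 5 ∧ 0 ≤ p.2 ∧ p.2 < 5

def allCells : List (Int × Int) :=
  (PySem.List.pyRange 0 5 1).flatMap (fun i => (PySem.List.pyRange 0 5 1).map (fun j => (i, j)))

def vA (b : List (List Int)) : Int × Int → Int := fun p => cellA b p.1 p.2

-- the ally relation: one step to a same-valued neighbour
def Adj (v : Int × Int → Int) (p q : Int × Int) : Prop :=
  inb p ∧ q ∈ pyNeighbours p.1 p.2 ∧ v q = v p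

def Reach (v : Int × Int → Int) : Int × Int → Int × Int → Prop :=
  Relation.ReflTransGen (Adj v)

theorem mem_pyNeighbours (q : Int × Int) (r c : Int) :
    q ∈ pyNeighbours r c ↔ inb q ∧
      ((q.1 = r - 1 ∧ q.2 = c) ∨ (q.1 = r + 1 ∧ q.2 = c) ∨
       (q.1 = r ∧ q.2 = c - 1) ∨ (q.1 = r ∧ q.2 = c + 1)) := by
  simp [pyNeighbours, List.mem_filter, inb, Prod.ext_iff]
  tauto

theorem inb_of_mem_pyNeighbours {q : Int × Int} {r c : Int} (h : q ∈ pyNeighbours r c) : inb q :=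
  ((mem_pyNeighbours q r c).1 h).1

theorem pyNeighbours_symm {p q : Int × Int} (hp : inb p) (h : q ∈ pyNeighbours p.1 p.2) :
    p ∈ pyNeighbours q.1 q.2 := by
  rw [mem_pyNeighbours] at h ⊢
  obtain ⟨hq, hrel⟩ := h
  refine ⟨hp, ?_⟩
  rcases hrel with ⟨h1, h2⟩ | ⟨h1, h2⟩ | ⟨h1, h2⟩ | ⟨h1, h2⟩ <;> omega

theorem mem_allCells (p : Int × Int) : p ∈ allCells ↔ inb p := by
  obtain ⟨x, y⟩ := p
  simp only [allCells, List.mem_flatMap, List.mem_map, PySem.List.mem_pyRange_one, inb,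
    Prod.mk.injEq]
  constructor
  · rintro ⟨i, hi, j, hj, rfl, rfl⟩; exact ⟨hi.1, hi.2, hj.1, hj.2⟩
  · rintro ⟨h1, h2, h3, h4⟩; exact ⟨x, ⟨h1, h2⟩, y, ⟨h3, h4⟩, rfl, rfl⟩

theorem length_allCells : allCells.length = 25 := by decide

theorem length_le_25 (l : List (Int × Int)) (hnd : l.Nodup) (hs : ∀ x ∈ l, inb x) :
    l.length ≤ 25 := by
  have h : l ⊆ allCells := fun x hx => (mem_allCells x).2 (hs x hx)
  have := List.Subperm.length_le (List.subperm_of_subset hnd h)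
  rw [length_allCells] at this
  exact this

theorem adj_symm {v : Int × Int → Int} {p q : Int × Int} (h : Adj v p q) : Adj v q p :=
  ⟨inb_of_mem_pyNeighbours h.2.1, pyNeighbours_symm h.1 h.2.1, h.2.2.symm⟩

theorem reach_symm {v : Int × Int → Int} {p q : Int × Int} (h : Reach v p q) : Reach v q p := by
  induction h with
  | refl => exact Relation.ReflTransGen.refl
  | tail _ e ih => exact Relation.ReflTransGen.trans (Relation.ReflTransGen.single (adj_symm e)) ih

theorem reach_val {v : Int × Int → Int} {p q : Int × Int} (h : Reach v p q) : v q = v p := by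
  induction h with
  | refl => rfl
  | tail _ e ih => exact e.2.2.trans ih

theorem reach_inb {v : Int × Int → Int} {p q : Int × Int} (h : Reach v p q) (hp : inb p) : inb q := by
  induction h with
  | refl => exact hp
  | tail _ e _ => exact inb_of_mem_pyNeighbours e.2.1


-- ===== A side: the DFS visits exactly the reachable cells =====

theorem mem_pyDetectAlly (b : List (List Int)) (r c : Int) (q : Int × Int) :
    q ∈ pyDetectAlly b r c ↔ q ∈ pyNeighbours r c ∧ cellA b q.1 q.2 = cellA b r c := by
  unfold pyDetectAlly
  rw [PySem.List.foldl_append_if_eq_filter]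
  simp [List.mem_filter]

-- the push loop of one DFS iteration (ms is ally_members at that moment)
def pushA (ms st al : List (Int × Int)) : List (Int × Int) :=
  al.foldl (fun st q => if !st.contains q && !ms.contains q then q :: st else st) st

theorem pushA_cons (ms st : List (Int × Int)) (q : Int × Int) (al : List (Int × Int)) :
    pushA ms st (q :: al) =
      pushA ms (if !st.contains q && !ms.contains q then q :: st else st) al := rfl

theorem pushA_subset (ms : List (Int × Int)) :
    ∀ (al st : List (Int × Int)), ∀ x ∈ st, x ∈ pushA ms st al := by
  intro al
  induction al with
  | nil => intro st x hx; exact hx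
  | cons q al ih =>
    intro st x hx
    rw [pushA_cons]
    by_cases hc : (!st.contains q && !ms.contains q) = true
    · rw [if_pos hc]; exact ih _ x (List.mem_cons_of_mem _ hx)
    · rw [if_neg hc]; exact ih _ x hx

theorem pushA_mem (ms : List (Int × Int)) :
    ∀ (al st : List (Int × Int)), ∀ x ∈ pushA ms st al, x ∈ st ∨ x ∈ al := by
  intro al
  induction al with
  | nil => intro st x hx; exact Or.inl hx
  | cons q al ih =>
    intro st x hx
    rw [pushA_cons] at hx
    by_cases hc : (!st.contains q && !ms.contains q) = true
    · rw [if_pos hc] at hx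
      rcases ih _ x hx with h | h
      · rcases List.mem_cons.1 h with h | h
        · exact Or.inr (h ▸ List.mem_cons_self)
        · exact Or.inl h
      · exact Or.inr (List.mem_cons_of_mem _ h)
    · rw [if_neg hc] at hx
      rcases ih _ x hx with h | h
      · exact Or.inl h
      · exact Or.inr (List.mem_cons_of_mem _ h)

theorem pushA_covers (ms : List (Int × Int)) :
    ∀ (al st : List (Int × Int)), ∀ q ∈ al, q ∈ pushA ms st al ∨ q ∈ ms := by
  intro al
  induction al with
  | nil => intro st q hq; cases hq
  | cons q' al ih =>
    intro st q hq
    rw [pushA_cons]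
    rcases List.mem_cons.1 hq with rfl | hq
    · by_cases hc : (!st.contains q && !ms.contains q) = true
      · rw [if_pos hc]; exact Or.inl (pushA_subset ms al _ q List.mem_cons_self)
      · rw [if_neg hc]
        simp only [List.contains_eq_mem, Bool.and_eq_true, Bool.not_eq_eq_eq_not, Bool.not_true,
          decide_eq_false_iff_not, not_and_or, not_not] at hc
        rcases hc with h | h
        · exact Or.inl (pushA_subset ms al _ q h)
        · exact Or.inr h
    · by_cases hc : (!st.contains q' && !ms.contains q') = true
      · rw [if_pos hc]; exact ih _ q hq
      · rw [if_neg hc]; exact ih _ q hq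

theorem pushA_nodup (ms : List (Int × Int)) :
    ∀ (al st : List (Int × Int)), st.Nodup → (∀ x ∈ st, x ∉ ms) →
      (pushA ms st al).Nodup ∧ ∀ x ∈ pushA ms st al, x ∉ ms := by
  intro al
  induction al with
  | nil => intro st h1 h2; exact ⟨h1, h2⟩
  | cons q al ih =>
    intro st h1 h2
    rw [pushA_cons]
    by_cases hc : (!st.contains q && !ms.contains q) = true
    · rw [if_pos hc]
      simp only [List.contains_eq_mem, Bool.and_eq_true, Bool.not_eq_eq_eq_not, Bool.not_true,
        decide_eq_false_iff_not] at hc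
      refine ih _ (List.nodup_cons.2 ⟨hc.1, h1⟩) ?_
      intro x hx
      rcases List.mem_cons.1 hx with rfl | hx
      · exact hc.2
      · exact h2 x hx
    · rw [if_neg hc]; exact ih _ h1 h2

theorem pyDfsLoop_sound (b : List (List Int)) :
    ∀ (fuel : Nat) (st ms : List (Int × Int)),
      (∀ s ∈ st, inb s) →
      ∀ x ∈ pyDfsLoop b fuel st ms, x ∈ ms ∨ ∃ s ∈ st, Reach (vA b) s x := by
  intro fuel
  induction fuel with
  | zero => intro st ms _ x hx; exact Or.inl hx
  | succ f ih =>
    intro st ms hst x hx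
    match st with
    | [] => exact Or.inl hx
    | p :: rest =>
      have hstep : pyDfsLoop b (f + 1) (p :: rest) ms =
          pyDfsLoop b f (pushA (ms ++ [p]) rest (pyDetectAlly b p.1 p.2)) (ms ++ [p]) := rfl
      rw [hstep] at hx
      have hinb' : ∀ s ∈ pushA (ms ++ [p]) rest (pyDetectAlly b p.1 p.2), inb s := by
        intro s hs
        rcases pushA_mem _ _ _ s hs with h | h
        · exact hst s (List.mem_cons_of_mem _ h)
        · exact inb_of_mem_pyNeighbours ((mem_pyDetectAlly b p.1 p.2 s).1 h).1
      rcases ih _ _ hinb' x hx with h | ⟨s, hs, hr⟩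
      · rcases List.mem_append.1 h with h | h
        · exact Or.inl h
        · refine Or.inr ⟨p, List.mem_cons_self, ?_⟩
          simp only [List.mem_singleton] at h
          exact h ▸ Relation.ReflTransGen.refl
      · rcases pushA_mem _ _ _ s hs with h | h
        · exact Or.inr ⟨s, List.mem_cons_of_mem _ h, hr⟩
        · obtain ⟨hn, hv⟩ := (mem_pyDetectAlly b p.1 p.2 s).1 h
          exact Or.inr ⟨p, List.mem_cons_self,
            Relation.ReflTransGen.head ⟨hst p List.mem_cons_self, hn, hv⟩ hr⟩

theorem pyDfsLoop_complete (b : List (List Int)) :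
    ∀ (fuel : Nat) (st ms : List (Int × Int)),
      (st ++ ms).Nodup →
      (∀ x ∈ st, inb x) → (∀ x ∈ ms, inb x) →
      (∀ m ∈ ms, ∀ y, Adj (vA b) m y → y ∈ st ∨ y ∈ ms) →
      26 ≤ fuel + ms.length →
      (∀ x, (x ∈ st ∨ x ∈ ms) → x ∈ pyDfsLoop b fuel st ms) ∧
      (∀ m ∈ pyDfsLoop b fuel st ms, ∀ y, Adj (vA b) m y → y ∈ pyDfsLoop b fuel st ms) := by
  intro fuel
  induction fuel with
  | zero =>
    intro st ms hnd hst hms hclo hfuel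
    match st with
    | [] =>
      refine ⟨fun x hx => ?_, fun m hm y hy => ?_⟩
      · rcases hx with h | h
        · cases h
        · exact h
      · rcases hclo m hm y hy with h | h
        · cases h
        · exact h
    | p :: rest =>
      exfalso
      have hle : ((p :: rest) ++ ms).length ≤ 25 :=
        length_le_25 _ hnd (by
          intro x hx
          rcases List.mem_append.1 hx with h | h
          · exact hst x h
          · exact hms x h)
      simp only [List.length_append, List.length_cons] at hle
      omega
  | succ f ih =>
    intro st ms hnd hst hms hclo hfuel
    match st with
    | [] =>
      refine ⟨fun x hx => ?_, fun m hm y hy => ?_⟩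
      · rcases hx with h | h
        · cases h
        · exact h
      · rcases hclo m hm y hy with h | h
        · cases h
        · exact h
    | p :: rest =>
      have hstep : pyDfsLoop b (f + 1) (p :: rest) ms =
          pyDfsLoop b f (pushA (ms ++ [p]) rest (pyDetectAlly b p.1 p.2)) (ms ++ [p]) := rfl
      set al := pyDetectAlly b p.1 p.2 with hal
      set ms' := ms ++ [p] with hms'
      set st' := pushA ms' rest al with hst'
      -- facts from the old Nodup
      have hpile := List.nodup_append.1 hnd
      have hprest : (p :: rest).Nodup := hpile.1
      have hmsnd : ms.Nodup := hpile.2.1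
      have hdisj : ∀ x ∈ p :: rest, x ∉ ms := by
        intro x hx hxm
        exact hpile.2.2 x hx x hxm rfl
      have hpnotrest : p ∉ rest := (List.nodup_cons.1 hprest).1
      have hrestnd : rest.Nodup := (List.nodup_cons.1 hprest).2
      have hrestms' : ∀ x ∈ rest, x ∉ ms' := by
        intro x hx hxm
        rcases List.mem_append.1 hxm with h | h
        · exact hdisj x (List.mem_cons_of_mem _ hx) h
        · simp only [List.mem_singleton] at h
          exact hpnotrest (h ▸ hx)
      obtain ⟨hst'nd, hst'ms'⟩ := pushA_nodup ms' al rest hrestnd hrestms'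
      have hms'nd : ms'.Nodup := by
        rw [hms', List.nodup_append]
        refine ⟨hmsnd, List.nodup_singleton p, ?_⟩
        intro x hx y hy hxy
        simp only [List.mem_singleton] at hy
        exact hdisj y (hy ▸ List.mem_cons_self) ((hxy ▸ hx : (y : Int × Int) ∈ ms))
      have hnd' : (st' ++ ms').Nodup := by
        rw [List.nodup_append]
        refine ⟨hst'nd, hms'nd, ?_⟩
        intro x hx y hy hxy
        exact hst'ms' x hx (hxy ▸ hy)
      have hstinb' : ∀ x ∈ st', inb x := by
        intro x hx
        rcases pushA_mem _ _ _ x hx with h | h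
        · exact hst x (List.mem_cons_of_mem _ h)
        · exact inb_of_mem_pyNeighbours ((mem_pyDetectAlly b p.1 p.2 x).1 h).1
      have hmsinb' : ∀ x ∈ ms', inb x := by
        intro x hx
        rcases List.mem_append.1 hx with h | h
        · exact hms x h
        · simp only [List.mem_singleton] at h
          exact h ▸ hst p List.mem_cons_self
      have hclo' : ∀ m ∈ ms', ∀ y, Adj (vA b) m y → y ∈ st' ∨ y ∈ ms' := by
        intro m hm y hy
        rcases List.mem_append.1 hm with h | h
        · rcases hclo m h y hy with h2 | h2
          · rcases List.mem_cons.1 h2 with rfl | h2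
            · exact Or.inr (List.mem_append.2 (Or.inr List.mem_cons_self))
            · exact Or.inl (pushA_subset _ _ _ y h2)
          · exact Or.inr (List.mem_append.2 (Or.inl h2))
        · simp only [List.mem_singleton] at h
          subst h
          have hyal : y ∈ al := (mem_pyDetectAlly b m.1 m.2 y).2 ⟨hy.2.1, hy.2.2⟩
          rcases pushA_covers ms' al rest y hyal with h | h
          · exact Or.inl h
          · exact Or.inr h
      have hfuel' : 26 ≤ f + ms'.length := by
        simp only [hms', List.length_append, List.length_singleton]
        omega
      obtain ⟨hmem, hcl⟩ := ih st' ms' hnd' hstinb' hmsinb' hclo' hfuel'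
      rw [hstep]
      refine ⟨fun x hx => ?_, hcl⟩
      rcases hx with h | h
      · rcases List.mem_cons.1 h with rfl | h
        · exact hmem x (Or.inr (List.mem_append.2 (Or.inr List.mem_cons_self)))
        · exact hmem x (Or.inl (pushA_subset _ _ _ x h))
      · exact hmem x (Or.inr (List.mem_append.2 (Or.inl h)))

theorem mem_pyAllyDfs (b : List (List Int)) (i j : Int) (hij : inb (i, j)) (x : Int × Int) :
    x ∈ pyAllyDfs b i j ↔ Reach (vA b) (i, j) x := by
  constructor
  · intro hx
    rcases pyDfsLoop_sound b 26 [(i, j)] [] (by simpa using hij) x hx with h | ⟨s, hs, hr⟩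
    · cases h
    · simp only [List.mem_singleton] at hs
      exact hs ▸ hr
  · intro hr
    obtain ⟨hmem, hclo⟩ := pyDfsLoop_complete b 26 [(i, j)] []
      (by simp) (by simpa using hij) (by simp) (by simp) (by simp)
    induction hr with
    | refl => exact hmem _ (Or.inl List.mem_cons_self)
    | tail h e ih => exact hclo _ ih _ e


-- ===== B side: the component flood fill visits exactly the reachable cells =====

-- the neighbour scan of one flood iteration, on the (frontier, comp) pair
def pushB (b : List (List Int)) (sc : Int) (nl : List (Int × Int))
    (st : List (Int × Int)) (cp : PySem.Set (Int × Int)) :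
    List (Int × Int) × PySem.Set (Int × Int) :=
  nl.foldl (fun s q =>
    if cellA b q.1 q.2 == sc && !(PySem.Set.contains s.2 q)
    then (q :: s.1, PySem.Set.add s.2 q) else s) (st, cp)

theorem pushB_cons (b : List (List Int)) (sc : Int) (q : Int × Int) (nl st cp) :
    pushB b sc (q :: nl) st cp =
      if cellA b q.1 q.2 == sc && !(PySem.Set.contains cp q)
      then pushB b sc nl (q :: st) (PySem.Set.add cp q) else pushB b sc nl st cp := by
  by_cases hc : (cellA b q.1 q.2 == sc && !(PySem.Set.contains cp q)) = true
  · rw [if_pos hc]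
    show (nl.foldl _ (if _ then _ else _)) = _
    rw [if_pos hc]
    rfl
  · rw [if_neg hc]
    show (nl.foldl _ (if _ then _ else _)) = _
    rw [if_neg hc]
    rfl

theorem pushB_cond (b : List (List Int)) (sc : Int) (q : Int × Int) (cp : PySem.Set (Int × Int)) :
    (cellA b q.1 q.2 == sc && !(PySem.Set.contains cp q)) = true ↔
      cellA b q.1 q.2 = sc ∧ q ∉ cp := by
  simp

theorem pushB_cp_subset (b : List (List Int)) (sc : Int) :
    ∀ (nl : List (Int × Int)) st cp, ∀ x ∈ cp, x ∈ (pushB b sc nl st cp).2 := by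
  intro nl
  induction nl with
  | nil => intro st cp x hx; exact hx
  | cons q nl ih =>
    intro st cp x hx
    rw [pushB_cons]
    split
    · exact ih _ _ x ((PySem.Set.mem_add _ _ _).2 (Or.inl hx))
    · exact ih _ _ x hx

theorem pushB_st_subset (b : List (List Int)) (sc : Int) :
    ∀ (nl : List (Int × Int)) st cp, ∀ x ∈ st, x ∈ (pushB b sc nl st cp).1 := by
  intro nl
  induction nl with
  | nil => intro st cp x hx; exact hx
  | cons q nl ih =>
    intro st cp x hx
    rw [pushB_cons]
    split
    · exact ih _ _ x (List.mem_cons_of_mem _ hx)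
    · exact ih _ _ x hx

theorem pushB_cp_mem (b : List (List Int)) (sc : Int) :
    ∀ (nl : List (Int × Int)) st cp, ∀ x ∈ (pushB b sc nl st cp).2,
      x ∈ cp ∨ (x ∈ nl ∧ cellA b x.1 x.2 = sc) := by
  intro nl
  induction nl with
  | nil => intro st cp x hx; exact Or.inl hx
  | cons q nl ih =>
    intro st cp x hx
    rw [pushB_cons] at hx
    by_cases hc : (cellA b q.1 q.2 == sc && !(PySem.Set.contains cp q)) = true
    · rw [if_pos hc] at hx
      rcases ih _ _ x hx with h | h
      · rcases (PySem.Set.mem_add _ _ _).1 h with h | rfl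
        · exact Or.inl h
        · exact Or.inr ⟨List.mem_cons_self, ((pushB_cond b sc x cp).1 hc).1⟩
      · exact Or.inr ⟨List.mem_cons_of_mem _ h.1, h.2⟩
    · rw [if_neg hc] at hx
      rcases ih _ _ x hx with h | h
      · exact Or.inl h
      · exact Or.inr ⟨List.mem_cons_of_mem _ h.1, h.2⟩

theorem pushB_st_mem (b : List (List Int)) (sc : Int) :
    ∀ (nl : List (Int × Int)) st cp, ∀ x ∈ (pushB b sc nl st cp).1,
      x ∈ st ∨ (x ∈ nl ∧ cellA b x.1 x.2 = sc) := by
  intro nl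
  induction nl with
  | nil => intro st cp x hx; exact Or.inl hx
  | cons q nl ih =>
    intro st cp x hx
    rw [pushB_cons] at hx
    by_cases hc : (cellA b q.1 q.2 == sc && !(PySem.Set.contains cp q)) = true
    · rw [if_pos hc] at hx
      rcases ih _ _ x hx with h | h
      · rcases List.mem_cons.1 h with rfl | h
        · exact Or.inr ⟨List.mem_cons_self, ((pushB_cond b sc x cp).1 hc).1⟩
        · exact Or.inl h
      · exact Or.inr ⟨List.mem_cons_of_mem _ h.1, h.2⟩
    · rw [if_neg hc] at hx
      rcases ih _ _ x hx with h | h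
      · exact Or.inl h
      · exact Or.inr ⟨List.mem_cons_of_mem _ h.1, h.2⟩

theorem pushB_covers (b : List (List Int)) (sc : Int) :
    ∀ (nl : List (Int × Int)) st cp, ∀ q ∈ nl, cellA b q.1 q.2 = sc →
      q ∈ (pushB b sc nl st cp).2 := by
  intro nl
  induction nl with
  | nil => intro st cp q hq; cases hq
  | cons q' nl ih =>
    intro st cp q hq hv
    rw [pushB_cons]
    rcases List.mem_cons.1 hq with rfl | hq
    · by_cases hc : (cellA b q.1 q.2 == sc && !(PySem.Set.contains cp q)) = true
      · rw [if_pos hc]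
        exact pushB_cp_subset b sc nl _ _ q ((PySem.Set.mem_add _ _ _).2 (Or.inr rfl))
      · rw [if_neg hc]
        have : q ∈ cp := by
          by_contra hqc
          exact hc ((pushB_cond b sc q cp).2 ⟨hv, hqc⟩)
        exact pushB_cp_subset b sc nl _ _ q this
    · split
      · exact ih _ _ q hq hv
      · exact ih _ _ q hq hv

theorem pushB_nodup (b : List (List Int)) (sc : Int) :
    ∀ (nl : List (Int × Int)) st cp, cp.Nodup → (pushB b sc nl st cp).2.Nodup := by
  intro nl
  induction nl with
  | nil => intro st cp h; exact h
  | cons q nl ih =>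
    intro st cp h
    rw [pushB_cons]
    split
    · exact ih _ _ (PySem.Set.nodup_add _ _ h)
    · exact ih _ _ h

theorem pushB_st_sub_cp (b : List (List Int)) (sc : Int) :
    ∀ (nl : List (Int × Int)) st cp, (∀ x ∈ st, x ∈ cp) →
      ∀ x ∈ (pushB b sc nl st cp).1, x ∈ (pushB b sc nl st cp).2 := by
  intro nl
  induction nl with
  | nil => intro st cp h x hx; exact h x hx
  | cons q nl ih =>
    intro st cp h x hx
    rw [pushB_cons] at hx ⊢
    by_cases hc : (cellA b q.1 q.2 == sc && !(PySem.Set.contains cp q)) = true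
    · rw [if_pos hc] at hx ⊢
      refine ih _ _ ?_ x hx
      intro y hy
      rcases List.mem_cons.1 hy with rfl | hy
      · exact (PySem.Set.mem_add _ _ _).2 (Or.inr rfl)
      · exact (PySem.Set.mem_add _ _ _).2 (Or.inl (h y hy))
    · rw [if_neg hc] at hx ⊢
      exact ih _ _ h x hx

theorem pushB_new_in_st (b : List (List Int)) (sc : Int) :
    ∀ (nl : List (Int × Int)) st cp, ∀ x ∈ (pushB b sc nl st cp).2,
      x ∈ cp ∨ x ∈ (pushB b sc nl st cp).1 := by
  intro nl
  induction nl with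
  | nil => intro st cp x hx; exact Or.inl hx
  | cons q nl ih =>
    intro st cp x hx
    rw [pushB_cons] at hx ⊢
    by_cases hc : (cellA b q.1 q.2 == sc && !(PySem.Set.contains cp q)) = true
    · rw [if_pos hc] at hx ⊢
      rcases ih _ _ x hx with h | h
      · rcases (PySem.Set.mem_add _ _ _).1 h with h | rfl
        · exact Or.inl h
        · exact Or.inr (pushB_st_subset b sc nl _ _ x List.mem_cons_self)
      · exact Or.inr h
    · rw [if_neg hc] at hx ⊢
      exact ih _ _ x hx

theorem pushB_len (b : List (List Int)) (sc : Int) :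
    ∀ (nl : List (Int × Int)) st cp,
      (pushB b sc nl st cp).1.length + cp.length =
        st.length + (pushB b sc nl st cp).2.length := by
  intro nl
  induction nl with
  | nil => intro st cp; rfl
  | cons q nl ih =>
    intro st cp
    rw [pushB_cons]
    by_cases hc : (cellA b q.1 q.2 == sc && !(PySem.Set.contains cp q)) = true
    · rw [if_pos hc]
      have h := ih (q :: st) (PySem.Set.add cp q)
      have hlen : (PySem.Set.add cp q).length = cp.length + 1 := by
        rw [PySem.Set.add_of_not_mem ((pushB_cond b sc q cp).1 hc).2]
        simp
      rw [hlen] at h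
      simp only [List.length_cons] at h
      omega
    · rw [if_neg hc]
      exact ih st cp

theorem floodLoopB_sound (b : List (List Int)) (sc : Int) :
    ∀ (fuel : Nat) (st : List (Int × Int)) (cp : PySem.Set (Int × Int)),
      (∀ s ∈ st, inb s ∧ cellA b s.1 s.2 = sc) →
      ∀ x ∈ floodLoopB b sc fuel st cp, x ∈ cp ∨ ∃ s ∈ st, Reach (vA b) s x := by
  intro fuel
  induction fuel with
  | zero => intro st cp _ x hx; exact Or.inl hx
  | succ f ih =>
    intro st cp hst x hx
    match st with
    | [] => exact Or.inl hx
    | p :: rest =>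
      have hstep : floodLoopB b sc (f + 1) (p :: rest) cp =
          floodLoopB b sc f (pushB b sc (pyNeighbours p.1 p.2) rest cp).1
            (pushB b sc (pyNeighbours p.1 p.2) rest cp).2 := rfl
      rw [hstep] at hx
      have hadj : ∀ y, y ∈ pyNeighbours p.1 p.2 → cellA b y.1 y.2 = sc → Adj (vA b) p y := by
        intro y hn hv
        refine ⟨(hst p List.mem_cons_self).1, hn, ?_⟩
        show cellA b y.1 y.2 = cellA b p.1 p.2
        rw [hv, (hst p List.mem_cons_self).2]
      have hst' : ∀ s ∈ (pushB b sc (pyNeighbours p.1 p.2) rest cp).1, inb s ∧ cellA b s.1 s.2 = sc := by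
        intro s hs
        rcases pushB_st_mem b sc _ _ _ s hs with h | ⟨h1, h2⟩
        · exact hst s (List.mem_cons_of_mem _ h)
        · exact ⟨inb_of_mem_pyNeighbours h1, h2⟩
      rcases ih _ _ hst' x hx with h | ⟨s, hs, hr⟩
      · rcases pushB_cp_mem b sc _ _ _ x h with h | ⟨h1, h2⟩
        · exact Or.inl h
        · exact Or.inr ⟨p, List.mem_cons_self,
            Relation.ReflTransGen.single (hadj x h1 h2)⟩
      · rcases pushB_st_mem b sc _ _ _ s hs with h | ⟨h1, h2⟩
        · exact Or.inr ⟨s, List.mem_cons_of_mem _ h, hr⟩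
        · exact Or.inr ⟨p, List.mem_cons_self,
            Relation.ReflTransGen.head (hadj s h1 h2) hr⟩

theorem floodLoopB_complete (b : List (List Int)) (sc : Int) :
    ∀ (fuel : Nat) (st : List (Int × Int)) (cp : PySem.Set (Int × Int)),
      cp.Nodup → (∀ x ∈ st, x ∈ cp) →
      (∀ x ∈ cp, inb x ∧ cellA b x.1 x.2 = sc) →
      (∀ m ∈ cp, m ∉ st → ∀ y, Adj (vA b) m y → y ∈ cp) →
      26 + st.length ≤ fuel + cp.length →
      (∀ x ∈ cp, x ∈ floodLoopB b sc fuel st cp) ∧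
      (∀ m ∈ floodLoopB b sc fuel st cp, ∀ y, Adj (vA b) m y →
        y ∈ floodLoopB b sc fuel st cp) := by
  intro fuel
  induction fuel with
  | zero =>
    intro st cp hnd hstcp hval hclo hfuel
    match st with
    | [] =>
      exact ⟨fun x hx => hx, fun m hm y hy => hclo m hm (by simp) y hy⟩
    | p :: rest =>
      exfalso
      have hle : cp.length ≤ 25 := length_le_25 cp hnd (fun x hx => (hval x hx).1)
      simp only [List.length_cons] at hfuel
      omega
  | succ f ih =>
    intro st cp hnd hstcp hval hclo hfuel
    match st with
    | [] =>
      exact ⟨fun x hx => hx, fun m hm y hy => hclo m hm (by simp) y hy⟩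
    | p :: rest =>
      have hstep : floodLoopB b sc (f + 1) (p :: rest) cp =
          floodLoopB b sc f (pushB b sc (pyNeighbours p.1 p.2) rest cp).1
            (pushB b sc (pyNeighbours p.1 p.2) rest cp).2 := rfl
      set nl := pyNeighbours p.1 p.2 with hnl
      set st' := (pushB b sc nl rest cp).1 with hst'
      set cp' := (pushB b sc nl rest cp).2 with hcp'
      have hpcp : p ∈ cp := hstcp p List.mem_cons_self
      have hnd' : cp'.Nodup := pushB_nodup b sc nl rest cp hnd
      have hstcp' : ∀ x ∈ st', x ∈ cp' :=
        pushB_st_sub_cp b sc nl rest cp (fun x hx => hstcp x (List.mem_cons_of_mem _ hx))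
      have hval' : ∀ x ∈ cp', inb x ∧ cellA b x.1 x.2 = sc := by
        intro x hx
        rcases pushB_cp_mem b sc _ _ _ x hx with h | ⟨h1, h2⟩
        · exact hval x h
        · exact ⟨inb_of_mem_pyNeighbours h1, h2⟩
      have hclo' : ∀ m ∈ cp', m ∉ st' → ∀ y, Adj (vA b) m y → y ∈ cp' := by
        intro m hm hmst y hy
        have hmcp : m ∈ cp := by
          rcases pushB_new_in_st b sc nl rest cp m hm with h | h
          · exact h
          · exact absurd h hmst
        by_cases hmp : m = p
        · subst hmp
          have hyv : cellA b y.1 y.2 = sc := by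
            have h1 : vA b y = vA b m := hy.2.2
            have h2 : cellA b m.1 m.2 = sc := (hval m hmcp).2
            exact h1.trans h2
          exact pushB_covers b sc nl rest cp y hy.2.1 hyv
        · have hmrest : m ∉ p :: rest := by
            intro hmem
            rcases List.mem_cons.1 hmem with h | h
            · exact hmp h
            · exact hmst (pushB_st_subset b sc nl rest cp m h)
          exact pushB_cp_subset b sc nl rest cp y (hclo m hmcp hmrest y hy)
      have hfuel' : 26 + st'.length ≤ f + cp'.length := by
        have hlen := pushB_len b sc nl rest cp
        rw [← hst', ← hcp'] at hlen
        simp only [List.length_cons] at hfuel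
        omega
      obtain ⟨hmem, hcl⟩ := ih st' cp' hnd' hstcp' hval' hclo' hfuel'
      rw [hstep]
      exact ⟨fun x hx => hmem x (pushB_cp_subset b sc nl rest cp x hx), hcl⟩

theorem mem_floodB (b : List (List Int)) (sc : Int) (i j : Int) (hij : inb (i, j))
    (hsc : cellA b i j = sc) (x : Int × Int) :
    x ∈ floodLoopB b sc 27 [(i, j)] (PySem.Set.ofList [(i, j)]) ↔ Reach (vA b) (i, j) x := by
  have hof : PySem.Set.ofList [((i : Int), (j : Int))] = [(i, j)] :=
    PySem.Set.ofList_eq_self_of_nodup _ (List.nodup_singleton _)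
  rw [hof]
  constructor
  · intro hx
    rcases floodLoopB_sound b sc 27 [(i, j)] [(i, j)]
      (by intro s hs; simp only [List.mem_singleton] at hs; exact hs ▸ ⟨hij, hsc⟩) x hx with
      h | ⟨s, hs, hr⟩
    · simp only [List.mem_singleton] at h
      exact h ▸ Relation.ReflTransGen.refl
    · simp only [List.mem_singleton] at hs
      exact hs ▸ hr
  · intro hr
    obtain ⟨hmem, hclo⟩ := floodLoopB_complete b sc 27 [(i, j)] [(i, j)]
      (List.nodup_singleton _) (fun x hx => hx)
      (by intro y hy; simp only [List.mem_singleton] at hy; exact hy ▸ ⟨hij, hsc⟩)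
      (by intro m hm hmst; simp only [List.mem_singleton] at hm; exact absurd (hm ▸ List.mem_cons_self) hmst)
      (by simp)
    induction hr with
    | refl => exact hmem _ List.mem_cons_self
    | tail h e ih => exact hclo _ ih _ e


-- ===== B side: the component sweep =====

-- one step of the component sweep, over a single cell
def compStep (b : List (List Int)) (sc : Int)
    (comps : List (PySem.Set (Int × Int) × PySem.Set (Int × Int))) (p : Int × Int) :
    List (PySem.Set (Int × Int) × PySem.Set (Int × Int)) :=
  if cellA b p.1 p.2 == sc && !(comps.any (fun c => PySem.Set.contains c.1 p)) then
    comps ++ [(floodLoopB b sc 27 [p] (PySem.Set.ofList [p]),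
      libsOfB b (floodLoopB b sc 27 [p] (PySem.Set.ofList [p])))]
  else comps

theorem compsB_eq (b : List (List Int)) (sc : Int) :
    compsB b sc = allCells.foldl (compStep b sc) [] := by
  unfold compsB allCells
  rw [List.foldl_flatMap]
  rfl

-- what a finished (component, liberty-set) pair is
def GoodComp (b : List (List Int)) (sc : Int)
    (C : PySem.Set (Int × Int) × PySem.Set (Int × Int)) : Prop :=
  ∃ s0, inb s0 ∧ cellA b s0.1 s0.2 = sc ∧
    (∀ x, x ∈ C.1 ↔ Reach (vA b) s0 x) ∧
    (∀ r, r ∈ C.2 ↔ ∃ q, q ∈ C.1 ∧ r ∈ pyNeighbours q.1 q.2 ∧ cellA b r.1 r.2 = 0)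

theorem mem_addIf (b : List (List Int)) :
    ∀ (l : List (Int × Int)) (acc : PySem.Set (Int × Int)) (x : Int × Int),
      x ∈ l.foldl (fun s r => if cellA b r.1 r.2 == 0 then PySem.Set.add s r else s) acc ↔
        x ∈ acc ∨ (x ∈ l ∧ cellA b x.1 x.2 = 0) := by
  intro l
  induction l with
  | nil => intro acc x; simp
  | cons r l ih =>
    intro acc x
    show x ∈ l.foldl _ (if _ then _ else _) ↔ _
    by_cases hc : (cellA b r.1 r.2 == 0) = true
    · rw [if_pos hc]
      rw [ih]
      simp only [beq_iff_eq] at hc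
      rw [PySem.Set.mem_add]
      constructor
      · rintro ((h | rfl) | h)
        · exact Or.inl h
        · exact Or.inr ⟨List.mem_cons_self, hc⟩
        · exact Or.inr ⟨List.mem_cons_of_mem _ h.1, h.2⟩
      · rintro (h | ⟨hm, hv⟩)
        · exact Or.inl (Or.inl h)
        · rcases List.mem_cons.1 hm with rfl | hm
          · exact Or.inl (Or.inr rfl)
          · exact Or.inr ⟨hm, hv⟩
    · rw [if_neg hc]
      rw [ih]
      simp only [beq_iff_eq] at hc
      constructor
      · rintro (h | h)
        · exact Or.inl h
        · exact Or.inr ⟨List.mem_cons_of_mem _ h.1, h.2⟩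
      · rintro (h | ⟨hm, hv⟩)
        · exact Or.inl h
        · rcases List.mem_cons.1 hm with rfl | hm
          · exact absurd hv hc
          · exact Or.inr ⟨hm, hv⟩

theorem mem_libsOfB (b : List (List Int)) (comp : PySem.Set (Int × Int)) (r : Int × Int) :
    r ∈ libsOfB b comp ↔
      ∃ q, q ∈ comp ∧ r ∈ pyNeighbours q.1 q.2 ∧ cellA b r.1 r.2 = 0 := by
  have haux : ∀ (l : List (Int × Int)) (acc : PySem.Set (Int × Int)),
      r ∈ l.foldl (fun s q =>
        (pyNeighbours q.1 q.2).foldl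
          (fun s r => if cellA b r.1 r.2 == 0 then PySem.Set.add s r else s) s) acc ↔
      r ∈ acc ∨ ∃ q, q ∈ l ∧ r ∈ pyNeighbours q.1 q.2 ∧ cellA b r.1 r.2 = 0 := by
    intro l
    induction l with
    | nil => intro acc; simp
    | cons q l ih =>
      intro acc
      show r ∈ l.foldl _ ((pyNeighbours q.1 q.2).foldl _ acc) ↔ _
      rw [ih, mem_addIf]
      constructor
      · rintro ((h | ⟨h1, h2⟩) | ⟨q', h1, h2, h3⟩)
        · exact Or.inl h
        · exact Or.inr ⟨q, List.mem_cons_self, h1, h2⟩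
        · exact Or.inr ⟨q', List.mem_cons_of_mem _ h1, h2, h3⟩
      · rintro (h | ⟨q', h1, h2, h3⟩)
        · exact Or.inl (Or.inl h)
        · rcases List.mem_cons.1 h1 with rfl | h1
          · exact Or.inl (Or.inr ⟨h2, h3⟩)
          · exact Or.inr ⟨q', h1, h2, h3⟩
  exact (haux comp PySem.Set.empty).trans (by simp)

theorem compsB_fold_good (b : List (List Int)) (sc : Int) :
    ∀ (l : List (Int × Int)) (comps0 : List (PySem.Set (Int × Int) × PySem.Set (Int × Int))),
      (∀ p ∈ l, inb p) → (∀ C ∈ comps0, GoodComp b sc C) →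
      (∀ C ∈ l.foldl (compStep b sc) comps0, GoodComp b sc C) ∧
      (∀ C ∈ comps0, C ∈ l.foldl (compStep b sc) comps0) ∧
      (∀ p ∈ l, cellA b p.1 p.2 = sc → ∃ C ∈ l.foldl (compStep b sc) comps0, p ∈ C.1) := by
  intro l
  induction l with
  | nil =>
    intro comps0 _ hG
    exact ⟨hG, fun C hC => hC, fun p hp => absurd hp (List.not_mem_nil)⟩
  | cons p l ih =>
    intro comps0 hinb hG
    have hpinb : inb p := hinb p List.mem_cons_self
    have hlinb : ∀ q ∈ l, inb q := fun q hq => hinb q (List.mem_cons_of_mem _ hq)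
    show (∀ C ∈ l.foldl (compStep b sc) (compStep b sc comps0 p), _) ∧ _ ∧ _
    by_cases hc : (cellA b p.1 p.2 == sc &&
        !(comps0.any (fun c => PySem.Set.contains c.1 p))) = true
    · -- a fresh component is created at p
      simp only [Bool.and_eq_true, beq_iff_eq, Bool.not_eq_eq_eq_not, Bool.not_true,
        List.any_eq_false] at hc
      obtain ⟨hv, hnone⟩ := hc
      have hstep : compStep b sc comps0 p = comps0 ++
          [(floodLoopB b sc 27 [p] (PySem.Set.ofList [p]),
            libsOfB b (floodLoopB b sc 27 [p] (PySem.Set.ofList [p])))] := by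
        unfold compStep
        rw [if_pos]
        simp only [Bool.and_eq_true, beq_iff_eq, Bool.not_eq_eq_eq_not, Bool.not_true,
          List.any_eq_false]
        exact ⟨hv, hnone⟩
      have hpgood : GoodComp b sc (floodLoopB b sc 27 [p] (PySem.Set.ofList [p]),
          libsOfB b (floodLoopB b sc 27 [p] (PySem.Set.ofList [p]))) := by
        refine ⟨p, hpinb, hv, ?_, ?_⟩
        · intro x
          exact mem_floodB b sc p.1 p.2 hpinb hv x
        · intro r
          exact mem_libsOfB b _ r
      have hG' : ∀ C ∈ compStep b sc comps0 p, GoodComp b sc C := by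
        intro C hC
        rw [hstep] at hC
        rcases List.mem_append.1 hC with h | h
        · exact hG C h
        · simp only [List.mem_singleton] at h
          exact h ▸ hpgood
      obtain ⟨ih1, ih2, ih3⟩ := ih (compStep b sc comps0 p) hlinb hG'
      refine ⟨ih1, ?_, ?_⟩
      · intro C hC
        exact ih2 C (by rw [hstep]; exact List.mem_append.2 (Or.inl hC))
      · intro q hq hqv
        rcases List.mem_cons.1 hq with rfl | hq
        · refine ⟨(floodLoopB b sc 27 [q] (PySem.Set.ofList [q]),
            libsOfB b (floodLoopB b sc 27 [q] (PySem.Set.ofList [q]))), ?_, ?_⟩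
          · exact ih2 _ (by rw [hstep]; exact List.mem_append.2 (Or.inr List.mem_cons_self))
          · exact (mem_floodB b sc q.1 q.2 hpinb hqv q).2 Relation.ReflTransGen.refl
        · exact ih3 q hq hqv
    · -- nothing new: either not a stone of this colour, or already inside a component
      have hstep : compStep b sc comps0 p = comps0 := by
        unfold compStep
        rw [if_neg hc]
      obtain ⟨ih1, ih2, ih3⟩ := ih (compStep b sc comps0 p) hlinb (by rw [hstep]; exact hG)
      refine ⟨ih1, fun C hC => ih2 C (by rw [hstep]; exact hC), ?_⟩
      intro q hq hqv
      rcases List.mem_cons.1 hq with rfl | hq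
      · -- q = p: the guard failed although the cell value is sc, so p is already covered
        have hany : comps0.any (fun c => PySem.Set.contains c.1 q) = true := by
          by_contra hno
          have hno' : comps0.any (fun c => PySem.Set.contains c.1 q) = false :=
            eq_false_of_ne_true hno
          exact hc (by rw [hno']; simp [hqv])
        obtain ⟨C, hC, hCc⟩ := List.any_eq_true.1 hany
        have hqC : q ∈ C.1 := (PySem.Set.contains_iff C.1 q).1 hCc
        exact ⟨C, ih2 C (by rw [hstep]; exact hC), hqC⟩
      · exact ih3 q hq hqv

theorem find_comp (b : List (List Int)) (sc : Int) (s : Int × Int)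
    (hinb : inb s) (hs : cellA b s.1 s.2 = sc) :
    ∃ c, (compsB b sc).find? (fun c => PySem.Set.contains c.1 s) = some c ∧
      (∀ x, x ∈ c.1 ↔ Reach (vA b) s x) ∧
      (∀ r, r ∈ c.2 ↔ ∃ q, Reach (vA b) s q ∧ r ∈ pyNeighbours q.1 q.2 ∧
        cellA b r.1 r.2 = 0) := by
  obtain ⟨hgood, _, hcover⟩ := compsB_fold_good b sc allCells []
    (fun p hp => (mem_allCells p).1 hp) (by simp)
  rw [← compsB_eq] at hgood hcover
  obtain ⟨C, hC, hsC⟩ := hcover s ((mem_allCells s).2 hinb) hs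
  have hsome : ((compsB b sc).find? (fun c => PySem.Set.contains c.1 s)).isSome = true :=
    List.find?_isSome.2 ⟨C, hC, (PySem.Set.contains_iff C.1 s).2 hsC⟩
  obtain ⟨c, hfind⟩ := Option.isSome_iff_exists.1 hsome
  have hcmem : c ∈ compsB b sc := List.mem_of_find?_eq_some hfind
  have hsc : s ∈ c.1 := (PySem.Set.contains_iff c.1 s).1
    (List.find?_some (p := fun (c : PySem.Set (Int × Int) × PySem.Set (Int × Int)) => PySem.Set.contains c.1 s) hfind)
  obtain ⟨s0, _, _, hmemc, hlibc⟩ := hgood c hcmem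
  have hreach : Reach (vA b) s0 s := (hmemc s).1 hsc
  have hiff : ∀ x, Reach (vA b) s0 x ↔ Reach (vA b) s x := by
    intro x
    constructor
    · intro h; exact Relation.ReflTransGen.trans (reach_symm hreach) h
    · intro h; exact Relation.ReflTransGen.trans hreach h
  refine ⟨c, hfind, fun x => (hmemc x).trans (hiff x), fun r => (hlibc r).trans ?_⟩
  constructor
  · rintro ⟨q, h1, h2, h3⟩
    exact ⟨q, (hiff q).1 ((hmemc q).1 h1), h2, h3⟩
  · rintro ⟨q, h1, h2, h3⟩
    exact ⟨q, (hmemc q).2 ((hiff q).2 h1), h2, h3⟩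


-- ===== B side: the per-empty-cell liberty set =====

def cellStep (b : List (List Int)) (sc : Int)
    (comps : List (PySem.Set (Int × Int) × PySem.Set (Int × Int))) :
    PySem.Set (Int × Int) → (Int × Int) → PySem.Set (Int × Int) :=
  fun s p =>
    let s := if cellA b p.1 p.2 == 0 then PySem.Set.add s p else s
    if cellA b p.1 p.2 == sc then
      match comps.find? (fun c => PySem.Set.contains c.1 p) with
      | some c => PySem.Set.union s c.2
      | none => s
    else s

theorem cellLibsB_eq (b : List (List Int)) (sc : Int) (comps) (i j : Int) :
    cellLibsB b sc comps i j =
      PySem.Set.discard ((pyNeighbours i j).foldl (cellStep b sc comps) PySem.Set.empty) (i, j) := rfl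

theorem mem_cellStep (b : List (List Int)) (sc : Int) (s : PySem.Set (Int × Int))
    (p x : Int × Int) (hp : inb p) :
    x ∈ cellStep b sc (compsB b sc) s p ↔
      x ∈ s ∨ (cellA b p.1 p.2 = 0 ∧ x = p) ∨
        (cellA b p.1 p.2 = sc ∧ ∃ q, Reach (vA b) p q ∧ x ∈ pyNeighbours q.1 q.2 ∧
          cellA b x.1 x.2 = 0) := by
  have hmem₁ : x ∈ (if cellA b p.1 p.2 == 0 then PySem.Set.add s p else s) ↔
      x ∈ s ∨ (cellA b p.1 p.2 = 0 ∧ x = p) := by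
    by_cases h0 : (cellA b p.1 p.2 == 0) = true
    · rw [if_pos h0, PySem.Set.mem_add]
      simp only [beq_iff_eq] at h0
      constructor
      · rintro (h | rfl)
        · exact Or.inl h
        · exact Or.inr ⟨h0, rfl⟩
      · rintro (h | ⟨_, rfl⟩)
        · exact Or.inl h
        · exact Or.inr rfl
    · rw [if_neg h0]
      simp only [beq_iff_eq] at h0
      constructor
      · exact Or.inl
      · rintro (h | ⟨h1, _⟩)
        · exact h
        · exact absurd h1 h0
  show x ∈ (if cellA b p.1 p.2 == sc then _ else _) ↔ _
  by_cases hsc : (cellA b p.1 p.2 == sc) = true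
  · have hscv : cellA b p.1 p.2 = sc := beq_iff_eq.1 hsc
    obtain ⟨c, hfind, _, hlibc⟩ := find_comp b sc p hp hscv
    rw [if_pos hsc, hfind]
    show x ∈ PySem.Set.union _ c.2 ↔ _
    rw [PySem.Set.mem_union, hmem₁]
    constructor
    · rintro ((h | h) | h)
      · exact Or.inl h
      · exact Or.inr (Or.inl h)
      · exact Or.inr (Or.inr ⟨hscv, (hlibc x).1 h⟩)
    · rintro (h | h | ⟨_, h⟩)
      · exact Or.inl (Or.inl h)
      · exact Or.inl (Or.inr h)
      · exact Or.inr ((hlibc x).2 h)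
  · rw [if_neg hsc]
    simp only [beq_iff_eq] at hsc
    rw [hmem₁]
    constructor
    · rintro (h | h)
      · exact Or.inl h
      · exact Or.inr (Or.inl h)
    · rintro (h | h | ⟨h1, _⟩)
      · exact Or.inl h
      · exact Or.inr h
      · exact absurd h1 hsc

theorem mem_cellFold (b : List (List Int)) (sc : Int) :
    ∀ (nl : List (Int × Int)) (s : PySem.Set (Int × Int)) (x : Int × Int),
      (∀ p ∈ nl, inb p) →
      (x ∈ nl.foldl (cellStep b sc (compsB b sc)) s ↔
        x ∈ s ∨ ∃ p, p ∈ nl ∧ ((cellA b p.1 p.2 = 0 ∧ x = p) ∨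
          (cellA b p.1 p.2 = sc ∧ ∃ q, Reach (vA b) p q ∧ x ∈ pyNeighbours q.1 q.2 ∧
            cellA b x.1 x.2 = 0))) := by
  intro nl
  induction nl with
  | nil => intro s x _; simp
  | cons p nl ih =>
    intro s x hinb
    show x ∈ nl.foldl _ (cellStep b sc (compsB b sc) s p) ↔ _
    rw [ih _ x (fun q hq => hinb q (List.mem_cons_of_mem _ hq)),
      mem_cellStep b sc s p x (hinb p List.mem_cons_self)]
    constructor
    · rintro ((h | h) | ⟨p', h1, h2⟩)
      · exact Or.inl h
      · exact Or.inr ⟨p, List.mem_cons_self, h⟩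
      · exact Or.inr ⟨p', List.mem_cons_of_mem _ h1, h2⟩
    · rintro (h | ⟨p', h1, h2⟩)
      · exact Or.inl (Or.inl h)
      · rcases List.mem_cons.1 h1 with rfl | h1
        · exact Or.inl (Or.inr h2)
        · exact Or.inr ⟨p', h1, h2⟩

theorem mem_cellLibsB (b : List (List Int)) (sc : Int) (i j : Int) (x : Int × Int) :
    x ∈ cellLibsB b sc (compsB b sc) i j ↔
      x ≠ (i, j) ∧ ∃ p, p ∈ pyNeighbours i j ∧ ((cellA b p.1 p.2 = 0 ∧ x = p) ∨
        (cellA b p.1 p.2 = sc ∧ ∃ q, Reach (vA b) p q ∧ x ∈ pyNeighbours q.1 q.2 ∧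
          cellA b x.1 x.2 = 0)) := by
  rw [cellLibsB_eq, PySem.Set.mem_discard,
    mem_cellFold b sc (pyNeighbours i j) PySem.Set.empty x
      (fun p hp => inb_of_mem_pyNeighbours (q := p) hp)]
  simp only [PySem.Set.empty]
  constructor
  · rintro ⟨h | h, hne⟩
    · cases h
    · exact ⟨hne, h⟩
  · rintro ⟨hne, h⟩
    exact ⟨Or.inr h, hne⟩


-- ===== placing the stone, and the decomposition of reachability over the modified board =====

theorem ne_of_mem_pyNeighbours {s : Int × Int} {r c : Int} (h : s ∈ pyNeighbours r c) :
    s ≠ (r, c) := by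
  rw [mem_pyNeighbours] at h
  intro hs
  subst hs
  rcases h.2 with ⟨h1, _⟩ | ⟨h1, _⟩ | ⟨_, h2⟩ | ⟨_, h2⟩ <;> omega

theorem cellA_setCellA (b : List (List Int)) (hb5 : 5 ≤ b.length)
    (hrow : ∀ row ∈ b.take 5, 5 ≤ row.length) (i j v : Int) (hij : inb (i, j))
    (p : Int × Int) (hp : inb p) :
    cellA (setCellA b i j v) p.1 p.2 = if p = (i, j) then v else cellA b p.1 p.2 := by
  obtain ⟨hi0, hi5, hj0, hj5⟩ := hij
  obtain ⟨hp0, hp5, hq0, hq5⟩ := hp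
  simp only at hi0 hi5 hj0 hj5 hp0 hp5 hq0 hq5
  have hit : i.toNat < b.length := by omega
  have hpt : p.1.toNat < b.length := by omega
  have hrowi : 5 ≤ b[i.toNat].length := by
    have hmem : b[i.toNat] ∈ b.take 5 := by
      have h5 : i.toNat < (b.take 5).length := by simp [List.length_take]; omega
      have := List.getElem_take (xs := b) (j := 5) (i := i.toNat) (h := h5)
      exact this ▸ List.getElem_mem h5
    exact hrow _ hmem
  have hrowp : 5 ≤ b[p.1.toNat].length := by
    have hmem : b[p.1.toNat] ∈ b.take 5 := by
      have h5 : p.1.toNat < (b.take 5).length := by simp [List.length_take]; omega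
      have := List.getElem_take (xs := b) (j := 5) (i := p.1.toNat) (h := h5)
      exact this ▸ List.getElem_mem h5
    exact hrow _ hmem
  unfold cellA setCellA
  rw [PySem.List.pySetD_of_nonneg _ _ hi0,
    PySem.List.pyGetD_eq_getElem _ _ hi0 (by omega),
    PySem.List.pySetD_of_nonneg _ _ hj0,
    PySem.List.pyGetD_eq_getElem _ _ hp0 (by simp [List.length_set]; omega),
    List.getElem_set]
  by_cases hpi : p.1 = i
  · have : i.toNat = p.1.toNat := by omega
    rw [if_pos this]
    rw [PySem.List.pyGetD_eq_getElem _ _ hq0 (by simp [List.length_set]; omega),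
      List.getElem_set]
    by_cases hpj : p.2 = j
    · have : j.toNat = p.2.toNat := by omega
      rw [if_pos this, if_pos (by exact Prod.ext hpi hpj)]
    · have : ¬ j.toNat = p.2.toNat := by omega
      rw [if_neg this, if_neg (by intro h; exact hpj (congrArg Prod.snd h))]
      rw [PySem.List.pyGetD_eq_getElem _ _ hp0 (by omega),
        PySem.List.pyGetD_eq_getElem _ _ hq0 (by omega)]
      simp [hpi]
  · have : ¬ i.toNat = p.1.toNat := by omega
    rw [if_neg this, if_neg (by intro h; exact hpi (congrArg Prod.fst h))]
    rw [PySem.List.pyGetD_eq_getElem _ _ hp0 (by omega)]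

theorem reach_set_iff (b : List (List Int)) (hb5 : 5 ≤ b.length)
    (hrow : ∀ row ∈ b.take 5, 5 ≤ row.length) (i j sc : Int) (hij : inb (i, j))
    (q : Int × Int) :
    Reach (vA (setCellA b i j sc)) (i, j) q ↔
      (q = (i, j) ∨ ∃ s, s ∈ pyNeighbours i j ∧ cellA b s.1 s.2 = sc ∧
        Reach (vA b) s q) := by
  have key : ∀ p : Int × Int, inb p →
      vA (setCellA b i j sc) p = if p = (i, j) then sc else vA b p :=
    fun p hp => cellA_setCellA b hb5 hrow i j sc hij p hp
  have hkeyij : vA (setCellA b i j sc) (i, j) = sc := by rw [key (i, j) hij]; simp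
  constructor
  · intro h
    induction h with
    | refl => exact Or.inl rfl
    | tail h e ih =>
      rename_i m y
      have hym : vA (setCellA b i j sc) y = vA (setCellA b i j sc) m := e.2.2
      have hyinb : inb y := inb_of_mem_pyNeighbours e.2.1
      by_cases hyij : y = (i, j)
      · exact Or.inl hyij
      · have hyv : vA (setCellA b i j sc) y = vA b y := by rw [key y hyinb, if_neg hyij]
        rcases ih with rfl | ⟨s, hs, hsv, hr⟩
        · -- the previous cell is the placed stone itself
          have : vA b y = sc := by rw [← hyv, hym, hkeyij]
          exact Or.inr ⟨y, e.2.1, this, Relation.ReflTransGen.refl⟩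
        · by_cases hmij : m = (i, j)
          · have hv : vA b y = sc := by rw [← hyv, hym, hmij, hkeyij]
            exact Or.inr ⟨y, by simpa [hmij] using e.2.1, hv, Relation.ReflTransGen.refl⟩
          · have hminb : inb m := e.1
            have hmv : vA b m = sc := by
              have h1 : vA (setCellA b i j sc) m = vA b m := by rw [key m hminb, if_neg hmij]
              have h2 : vA b m = vA b s := reach_val hr
              rw [h2]
              exact hsv
            have hyv2 : vA b y = sc := by
              rw [← hyv, hym, key m hminb, if_neg hmij]
              exact hmv
            exact Or.inr ⟨s, hs, hsv,
              Relation.ReflTransGen.tail hr ⟨hminb, e.2.1, hyv2.trans hmv.symm⟩⟩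
  · rintro (rfl | ⟨s, hs, hsv, hr⟩)
    · exact Relation.ReflTransGen.refl
    · have hsinb : inb s := inb_of_mem_pyNeighbours hs
      have hsne : s ≠ (i, j) := ne_of_mem_pyNeighbours hs
      have hstep : Adj (vA (setCellA b i j sc)) (i, j) s := by
        refine ⟨hij, hs, ?_⟩
        rw [key s hsinb, if_neg hsne, hkeyij]
        exact hsv
      refine Relation.ReflTransGen.head hstep ?_
      -- lift the path through the unmodified board
      clear hstep
      induction hr with
      | refl => exact Relation.ReflTransGen.refl
      | tail h e ih =>
        rename_i m y
        have hminb : inb m := e.1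
        have hyinb : inb y := inb_of_mem_pyNeighbours e.2.1
        have hmv : vA b m = sc := (reach_val h).trans hsv
        have hyv : vA b y = sc := e.2.2.trans hmv
        refine Relation.ReflTransGen.tail ih ⟨hminb, e.2.1, ?_⟩
        rw [key y hyinb, key m hminb]
        by_cases hyij : y = (i, j) <;> by_cases hmij : m = (i, j) <;>
          simp [hyij, hmij, hyv, hmv]


-- ===== the per-empty-cell equivalence =====

theorem notEmpty_iff (l : List (Int × Int)) : (!l.isEmpty) = true ↔ ∃ x, x ∈ l := by
  cases l <;> simp

theorem perCell (b : List (List Int)) (sc : Int) (hb5 : 5 ≤ b.length)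
    (hrow : ∀ row ∈ b.take 5, 5 ≤ row.length) (i j : Int) (hij : inb (i, j)) :
    pyCheckLibs (setCellA b i j sc) i j sc =
      !(cellLibsB b sc (compsB b sc) i j).isEmpty := by
  rw [Bool.eq_iff_iff, notEmpty_iff]
  have key : ∀ p : Int × Int, inb p →
      vA (setCellA b i j sc) p = if p = (i, j) then sc else vA b p :=
    fun p hp => cellA_setCellA b hb5 hrow i j sc hij p hp
  have hkeyij : vA (setCellA b i j sc) (i, j) = sc := by rw [key (i, j) hij]; simp
  constructor
  · intro h
    simp only [pyCheckLibs, List.any_eq_true, beq_iff_eq] at h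
    obtain ⟨m, hm, r, hr, hrv⟩ := h
    rw [mem_pyAllyDfs _ i j hij] at hm
    have hminb : inb m := reach_inb hm hij
    have hrinb : inb r := inb_of_mem_pyNeighbours hr
    by_cases hrij : r = (i, j)
    · -- the found liberty is the placed cell itself: then sc = 0 and m is an empty neighbour
      have hsc0 : sc = 0 := by
        have : vA (setCellA b i j sc) r = 0 := hrv
        rw [hrij, hkeyij] at this
        exact this
      have hmij : m ≠ (i, j) := by
        intro hmeq
        exact (ne_of_mem_pyNeighbours (hrij ▸ hr)) (by rw [hmeq])
      have hmem2 : m ∈ pyNeighbours i j := pyNeighbours_symm hminb (hrij ▸ hr)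
      have hm0 : vA b m = 0 := by
        have h1 : vA (setCellA b i j sc) m = sc := (reach_val hm).trans hkeyij
        rw [key m hminb, if_neg hmij] at h1
        rw [h1, hsc0]
      exact ⟨m, (mem_cellLibsB b sc i j m).2 ⟨hmij, m, hmem2, Or.inl ⟨hm0, rfl⟩⟩⟩
    · have hrb : vA b r = 0 := by
        have h1 : vA (setCellA b i j sc) r = vA b r := by rw [key r hrinb, if_neg hrij]
        rw [← h1]
        exact hrv
      rcases (reach_set_iff b hb5 hrow i j sc hij m).1 hm with rfl | ⟨s, hs, hsv, hrch⟩
      · exact ⟨r, (mem_cellLibsB b sc i j r).2 ⟨hrij, r, hr, Or.inl ⟨hrb, rfl⟩⟩⟩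
      · exact ⟨r, (mem_cellLibsB b sc i j r).2
          ⟨hrij, s, hs, Or.inr ⟨hsv, m, hrch, hr, hrb⟩⟩⟩
  · rintro ⟨x, hx⟩
    rw [mem_cellLibsB] at hx
    obtain ⟨hxne, p, hp, hcase⟩ := hx
    simp only [pyCheckLibs, List.any_eq_true, beq_iff_eq]
    rcases hcase with ⟨hp0, hxp⟩ | ⟨hpsc, q, hq, hxq, hx0⟩
    · -- an empty neighbour of (i, j)
      refine ⟨(i, j), (mem_pyAllyDfs _ i j hij (i, j)).2 Relation.ReflTransGen.refl,
        p, hp, ?_⟩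
      show vA (setCellA b i j sc) p = 0
      rw [key p (inb_of_mem_pyNeighbours hp), if_neg (hxp ▸ hxne)]
      exact hp0
    · -- a liberty of an adjacent component
      have hm : Reach (vA (setCellA b i j sc)) (i, j) q :=
        (reach_set_iff b hb5 hrow i j sc hij q).2 (Or.inr ⟨p, hp, hpsc, hq⟩)
      refine ⟨q, (mem_pyAllyDfs _ i j hij q).2 hm, x, hxq, ?_⟩
      show vA (setCellA b i j sc) x = 0
      rw [key x (inb_of_mem_pyNeighbours hxq), if_neg hxne]
      exact hx0

-- ===== assembling the whole board loops =====

theorem pyEmptySpaces_eq (b : List (List Int)) :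
    pyEmptySpaces b = allCells.filter (fun p => cellA b p.1 p.2 == 0) := by
  have h1 : pyEmptySpaces b =
      allCells.foldl (fun acc p => if cellA b p.1 p.2 == 0 then acc ++ [p] else acc) [] := by
    unfold pyEmptySpaces allCells
    rw [List.foldl_flatMap]
    rfl
  rw [h1, PySem.List.foldl_append_if_eq_filter]
  rfl

theorem all_Liberties_eq_filter (b : List (List Int)) (sc : Int) :
    all_Liberties b sc = (pyEmptySpaces b).filter
      (fun p => pyCheckLibs (setCellA b p.1 p.2 sc) p.1 p.2 sc) := by
  unfold all_Liberties
  rw [PySem.List.foldl_append_if_eq_filter]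
  rfl

theorem all_Liberties_alt_eq_filter (b : List (List Int)) (sc : Int) :
    all_Liberties_alt b sc = allCells.filter
      (fun p => cellA b p.1 p.2 == 0 && !(cellLibsB b sc (compsB b sc) p.1 p.2).isEmpty) := by
  have h1 : all_Liberties_alt b sc =
      allCells.foldl (fun out p =>
        if cellA b p.1 p.2 == 0 then
          if (cellLibsB b sc (compsB b sc) p.1 p.2).isEmpty then out else out ++ [p]
        else out) [] := by
    unfold all_Liberties_alt allCells
    rw [List.foldl_flatMap]
    rfl
  have h2 : (fun (out : List (Int × Int)) (p : Int × Int) =>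
        if cellA b p.1 p.2 == 0 then
          if (cellLibsB b sc (compsB b sc) p.1 p.2).isEmpty then out else out ++ [p]
        else out) =
      (fun out p =>
        if (cellA b p.1 p.2 == 0 && !(cellLibsB b sc (compsB b sc) p.1 p.2).isEmpty)
        then out ++ [p] else out) := by
    funext out p
    by_cases hc : (cellA b p.1 p.2 == 0) = true
    · by_cases he : (cellLibsB b sc (compsB b sc) p.1 p.2).isEmpty = true
      · rw [if_pos hc, if_pos he, if_neg (by simp [hc, he])]
      · rw [if_pos hc, if_neg he, if_pos (by simp [hc, he])]
    · rw [if_neg hc, if_neg (by simp [hc])]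
  rw [h1, h2, PySem.List.foldl_append_if_eq_filter]
  rfl

-- ===== VERDICT (by name: the statement is the Claim_ definition above) =====
theorem all_Liberties_spec : Claim_equal_all_Liberties := by
  intro b sc _ hpre
  obtain ⟨hb5, hrow⟩ := hpre
  show all_Liberties b sc = all_Liberties_alt b sc
  rw [all_Liberties_eq_filter, pyEmptySpaces_eq, all_Liberties_alt_eq_filter,
    List.filter_filter]
  refine List.filter_congr ?_
  intro p hp
  have hpinb : inb p := (mem_allCells p).1 hp
  show (_ && _) = (cellA b p.1 p.2 == 0 && _)
  by_cases hc : (cellA b p.1 p.2 == 0) = true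
  · have hA := perCell b sc hb5 hrow p.1 p.2 hpinb
    rw [hA]
    simp [hc]
  · have hc' : (cellA b p.1 p.2 == 0) = false := eq_false_of_ne_true hc
    simp [hc']
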